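-- pv_equiv track=rewrite | github.com/Nik620/edX_Microsoft_DEV274x | Project3.py | word_mixer
-- ===== SOURCE A (Python) =====
-- def word_mixer(word_list):
--     word_list.sort()
--     new_words = []
--     if len(word_list) > 5:
--         while len(word_list) > 5:
--             new_words.append(word_list.pop(-5))
--             new_words.append(word_list.pop(0))
--             new_words.append(word_list.pop(-1))
--         return new_words
--     else:
--         new_words = word_list
--         return new_words
-- ===== SOURCE B (Python) =====
-- def word_mixer(word_list):
--     # Sort once, then consume the list with an index for the front and a small
--     # five-word window for the back, so each removal is O(1) instead of an O(n)
--     # list pop.  (A also sorts and empties its argument in place; this version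
--     # leaves the argument alone — the results are equal as values.)
--     s = sorted(word_list)
--     if len(s) <= 5:
--         return s
--     out = []
--     lo, hi = 0, len(s)   # s[lo:hi] is the not-yet-consumed middle part
--     tail = []            # the last few remaining words, topped up to five
--     while (hi - lo) + len(tail) > 5:
--         while len(tail) < 5:
--             hi -= 1
--             tail.insert(0, s[hi])
--         out.append(tail.pop(0))      # fifth word from the end
--         out.append(s[lo]); lo += 1   # first word
--         out.append(tail.pop())       # last word
--     return out
-- ===== Notes on version B (the rewrite author's own statement) =====
-- stated objective: faster
-- what changed: A repeatedly pops the 5th-from-end, first and last element of the sorted list, each pop shifting O(n) elements; B sorts once and then consumes the list with a front index and a five-word back window, so every removal is O(1).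
import Mathlib
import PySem

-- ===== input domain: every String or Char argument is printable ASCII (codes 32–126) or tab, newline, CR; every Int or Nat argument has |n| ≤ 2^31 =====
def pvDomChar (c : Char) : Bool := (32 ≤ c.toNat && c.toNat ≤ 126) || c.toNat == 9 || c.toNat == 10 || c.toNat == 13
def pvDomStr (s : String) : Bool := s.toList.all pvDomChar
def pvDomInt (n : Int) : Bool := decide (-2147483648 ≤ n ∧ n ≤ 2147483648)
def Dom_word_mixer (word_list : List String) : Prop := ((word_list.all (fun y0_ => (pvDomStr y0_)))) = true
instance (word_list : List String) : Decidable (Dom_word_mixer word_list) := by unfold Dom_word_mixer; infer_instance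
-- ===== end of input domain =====

-- B replaces A's three O(n) pops per round by a front index plus a five-word back
-- window, each removal O(1). Equivalence is about the RETURN value only: A also
-- sorts and empties its argument in place, B leaves it alone.

-- ===== PORT A =====
-- while len(word_list) > 5: new_words.append(pop(-5)); append(pop(0)); append(pop(-1))
-- (the `none` branches are unreachable: pop? cannot fail while the length exceeds 5)
def wmLoopA (cur : List String) (new_words : List String) : List String :=
  if _h : 5 < cur.length then
    match h1 : PySem.List.pop? cur (-5) with
    | none => new_words
    | some (w1, cur1) =>
      match h2 : PySem.List.pop? cur1 0 with
      | none => new_words ++ [w1]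
      | some (w2, cur2) =>
        match h3 : PySem.List.pop? cur2 (-1) with
        | none => new_words ++ [w1, w2]
        | some (w3, cur3) => wmLoopA cur3 (new_words ++ [w1, w2, w3])
  else new_words
termination_by cur.length
decreasing_by
  have l1 := PySem.List.length_of_pop?_eq_some _ h1
  have l2 := PySem.List.length_of_pop?_eq_some _ h2
  have l3 := PySem.List.length_of_pop?_eq_some _ h3
  simp at l1 l2 l3
  omega

def word_mixer (word_list : List String) : List String :=
  let wl := PySem.List.sorted word_list (fun x => x) false
  if 5 < wl.length then wmLoopA wl [] else wl

-- ===== PORT B =====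
-- inner `while len(tail) < 5: hi -= 1; tail.insert(0, s[hi])`
def wmRefill (s : List String) (hi : Nat) (tail : List String) : Nat × List String :=
  if tail.length < 5 then
    wmRefill s (hi - 1) (PySem.List.pyGetD s ((hi : Int) - 1) "" :: tail)
  else (hi, tail)
termination_by 5 - tail.length

-- outer `while (hi - lo) + len(tail) > 5: …` ; the fuel (one unit per round,
-- `s.length` is always enough) only makes the loop total
def wmLoopB (s : List String) (fuel : Nat) (lo hi : Nat) (tail out : List String) : List String :=
  match fuel with
  | 0 => out
  | fuel + 1 =>
    if 5 < (hi - lo) + tail.length then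
      let p := wmRefill s hi tail
      wmLoopB s fuel (lo + 1) p.1 ((p.2.drop 1).dropLast)
        (out ++ [p.2.getD 0 "", PySem.List.pyGetD s (lo : Int) "", p.2.getD (p.2.length - 1) ""])
    else out

def word_mixer_alt (word_list : List String) : List String :=
  let s := PySem.List.sorted word_list (fun x => x) false
  if s.length ≤ 5 then s
  else wmLoopB s s.length 0 s.length [] []

-- ===== PRECONDITION & SPEC =====
def Spec_word_mixer (word_list : List String) (out : List String) : Prop := out = word_mixer_alt word_list
instance (word_list : List String) (out : List String) : Decidable (Spec_word_mixer word_list out) := by unfold Spec_word_mixer; infer_instance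

-- ===== CLAIM (what is proved, stated in full; the proofs are below) =====
def Claim_equal_word_mixer : Prop := ∀ (word_list : List String), Dom_word_mixer word_list → Spec_word_mixer word_list (word_mixer word_list)

-- ===== LEMMAS AND PROOFS =====

-- the list left after one round of A's three pops
def wmNext (s : List String) : List String :=
  ((s.eraseIdx (s.length - 5)).tail).dropLast

-- round-by-round specification both ports are reduced to
def wmRounds (s : List String) : List String :=
  if _h : 5 < s.length then
    [s.getD (s.length - 5) "", s.getD 0 "", s.getD (s.length - 1) ""] ++ wmRounds (wmNext s)
  else []
termination_by s.length
decreasing_by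
  simp [wmNext, List.length_eraseIdx]
  split_ifs <;> omega

lemma pop_neg5 (cur : List String) (h : 5 ≤ cur.length) :
    PySem.List.pop? cur (-5) = some (cur.getD (cur.length - 5) "", cur.eraseIdx (cur.length - 5)) := by
  have h5 : cur.length - 5 < cur.length := by omega
  simp [PySem.List.pop?, PySem.List.pyIdx?, List.getD_eq_getElem?_getD]
  rw [if_pos h, Option.bind_some, List.getElem?_eq_getElem h5]
  simp

lemma pop_zero (cur : List String) (h : 1 ≤ cur.length) :
    PySem.List.pop? cur 0 = some (cur.getD 0 "", cur.tail) := by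
  obtain ⟨x, xs, rfl⟩ : ∃ x xs, cur = x :: xs := by
    cases cur with | nil => simp at h | cons a b => exact ⟨a, b, rfl⟩
  rw [PySem.List.pop?_zero_cons]; simp

lemma pop_neg1 (cur : List String) (h : 1 ≤ cur.length) :
    PySem.List.pop? cur (-1) = some (cur.getD (cur.length - 1) "", cur.dropLast) := by
  obtain ⟨xs, x, rfl⟩ : ∃ xs x, cur = xs ++ [x] := by
    rcases List.eq_nil_or_concat cur with rfl | ⟨xs, x, hc⟩
    · simp at h
    · exact ⟨xs, x, by simpa using hc⟩
  rw [PySem.List.pop?_last]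
  simp [List.getD_eq_getElem?_getD]

-- index mapping through eraseIdx (len-5) then tail
lemma mid_getD (s : List String) (h : 6 ≤ s.length) (i : Nat) :
    ((s.eraseIdx (s.length - 5)).tail).getD i "" =
      s.getD (if i < s.length - 6 then i + 1 else i + 2) "" := by
  simp only [List.getD_eq_getElem?_getD, List.getElem?_tail, List.getElem?_eraseIdx]
  by_cases hc : i < s.length - 6
  · rw [if_pos (by omega), if_pos hc]
  · rw [if_neg (by omega), if_neg hc]

lemma next_length (s : List String) (h : 5 ≤ s.length) :
    (wmNext s).length = s.length - 3 := by
  simp [wmNext, List.length_eraseIdx]; split_ifs <;> omega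

-- one unfolding of A's loop, with the three pops evaluated
lemma loopA_step (cur acc : List String) (h : 5 < cur.length) :
    wmLoopA cur acc = wmLoopA (wmNext cur)
      (acc ++ [cur.getD (cur.length - 5) "", cur.getD 0 "", cur.getD (cur.length - 1) ""]) := by
  have e1 : (cur.eraseIdx (cur.length - 5)).length = cur.length - 1 := by
    rw [List.length_eraseIdx, if_pos (by omega)]
  have p1 := pop_neg5 cur (by omega)
  have p2 := pop_zero (cur.eraseIdx (cur.length - 5)) (by omega)
  have p3 := pop_neg1 ((cur.eraseIdx (cur.length - 5)).tail) (by simp [e1]; omega)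
  rw [wmLoopA, dif_pos h]
  split
  · rename_i heq; rw [p1] at heq; simp at heq
  · rename_i w1 cur1 heq; rw [p1] at heq
    simp only [Option.some.injEq, Prod.mk.injEq] at heq
    obtain ⟨rfl, rfl⟩ := heq
    split
    · rename_i heq; rw [p2] at heq; simp at heq
    · rename_i w2 cur2 heq; rw [p2] at heq
      simp only [Option.some.injEq, Prod.mk.injEq] at heq
      obtain ⟨rfl, rfl⟩ := heq
      split
      · rename_i heq; rw [p3] at heq; simp at heq
      · rename_i w3 cur3 heq; rw [p3] at heq
        simp only [Option.some.injEq, Prod.mk.injEq] at heq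
        obtain ⟨rfl, rfl⟩ := heq
        have e2 : ((cur.eraseIdx (cur.length - 5)).tail).length = cur.length - 2 := by
          rw [List.length_tail, e1]; omega
        have g0 : (cur.eraseIdx (cur.length - 5)).getD 0 "" = cur.getD 0 "" := by
          simp only [List.getD_eq_getElem?_getD, List.getElem?_eraseIdx]
          rw [if_pos (by omega)]
        rw [e2, g0, mid_getD cur (by omega), if_neg (by omega)]
        have : cur.length - 2 - 1 + 2 = cur.length - 1 := by omega
        rw [this]
        rfl

-- A's loop equals the round specification
lemma loopA_eq : ∀ (n : Nat) (cur acc : List String), cur.length ≤ n →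
    wmLoopA cur acc = acc ++ wmRounds cur := by
  intro n
  induction n with
  | zero =>
    intro cur acc hl
    rw [wmLoopA, dif_neg (by omega), wmRounds, dif_neg (by omega), List.append_nil]
  | succ n ih =>
    intro cur acc hl
    by_cases h : 5 < cur.length
    · rw [loopA_step cur acc h,
        ih (wmNext cur) _ (by rw [next_length cur (by omega)]; omega)]
      conv_rhs => rw [wmRounds, dif_pos h]
      rw [List.append_assoc]
    · rw [wmLoopA, dif_neg h, wmRounds, dif_neg h, List.append_nil]

-- s.extract m (j+1) appends the element at j
lemma extract_snoc (s : List String) (m j : Nat) (hm : m ≤ j) (hj : j < s.length) :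
    s.extract m (j + 1) = s.extract m j ++ [s.getD j ""] := by
  simp only [List.extract_eq_drop_take]
  rw [show j + 1 - m = (j - m) + 1 by omega, List.take_succ]
  congr 1
  rw [List.getElem?_drop, show m + (j - m) = j by omega, List.getElem?_eq_getElem hj]
  simp [List.getD_eq_getElem?_getD, List.getElem?_eq_getElem hj]

-- the refill loop tops the window up to five words taken from s[hi-k:hi]
lemma refill_eq (s : List String) : ∀ (k hi : Nat) (tail : List String),
    tail.length + k = 5 → k ≤ hi → hi ≤ s.length →
    wmRefill s hi tail = (hi - k, s.extract (hi - k) hi ++ tail) := by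
  intro k
  induction k with
  | zero =>
    intro hi tail h _ _
    rw [wmRefill, if_neg (by omega)]
    simp [List.extract_eq_drop_take]
  | succ k ih =>
    intro hi tail h hk hs
    rw [wmRefill, if_pos (by omega)]
    have h1 : 1 ≤ hi := by omega
    rw [show ((hi : Int) - 1) = (((hi - 1 : Nat)) : Int) by omega, PySem.List.pyGetD_natCast]
    rw [ih (hi - 1) (s.getD (hi - 1) "" :: tail) (by simp; omega) (by omega) (by omega)]
    have hm : hi - 1 - k = hi - (k + 1) := by omega
    rw [hm]
    refine Prod.ext rfl ?_
    have hsn := extract_snoc s (hi - (k + 1)) (hi - 1) (by omega) (by omega)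
    rw [show hi - 1 + 1 = hi by omega] at hsn
    rw [hsn]
    simp

lemma extract_split (s : List String) (lo mid hi : Nat) (h1 : lo ≤ mid) (h2 : mid ≤ hi) :
    s.extract lo hi = s.extract lo mid ++ s.extract mid hi := by
  simp only [List.extract_eq_drop_take]
  rw [show hi - lo = (mid - lo) + (hi - mid) by omega, List.take_add]
  congr 1
  rw [List.drop_drop, show lo + (mid - lo) = mid by omega]

lemma length_extract (s : List String) (lo hi : Nat) (h1 : lo ≤ hi) (h2 : hi ≤ s.length) :
    (s.extract lo hi).length = hi - lo := by
  simp [List.extract_eq_drop_take]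
  omega

-- B's loop, from any reachable state, emits the rounds of the current list
-- (current list = s[lo:hi] ++ tail)
lemma loopB_eq (s : List String) : ∀ (fuel lo hi : Nat) (tail out : List String),
    hi ≤ s.length → lo ≤ hi → tail.length ≤ 5 → hi - lo ≤ fuel →
    wmLoopB s fuel lo hi tail out = out ++ wmRounds (s.extract lo hi ++ tail) := by
  intro fuel
  induction fuel with
  | zero =>
    intro lo hi tail out h1 h2 h3 h4
    have : hi = lo := by omega
    subst this
    rw [wmLoopB, wmRounds, dif_neg (by simp [List.extract_eq_drop_take]; omega)]
    simp
  | succ fuel ih =>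
    intro lo hi tail out h1 h2 h3 h4
    have hlen : (s.extract lo hi ++ tail).length = (hi - lo) + tail.length := by
      rw [List.length_append, length_extract s lo hi h2 h1]
    by_cases hg : 5 < (hi - lo) + tail.length
    · rw [wmLoopB, if_pos hg]
      -- refill
      set k := 5 - tail.length with hk
      have hklo : k ≤ hi - lo := by omega
      have hrf := refill_eq s k hi tail (by omega) (by omega) h1
      set hi' := hi - k with hhi'
      have hlo' : lo + 1 ≤ hi' := by omega
      set t := s.extract hi' hi ++ tail with ht
      have htlen : t.length = 5 := by
        rw [ht, List.length_append, length_extract s hi' hi (by omega) h1]; omega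
      have hcur : s.extract lo hi ++ tail = s.extract lo hi' ++ t := by
        rw [ht, ← List.append_assoc, ← extract_split s lo hi' hi (by omega) (by omega)]
      have hAlen : (s.extract lo hi').length = hi' - lo :=
        length_extract s lo hi' (by omega) (by omega)
      have hA0 : (s.extract lo hi').getD 0 "" = s.getD lo "" := by
        have hlolt : lo < s.length := by omega
        simp only [List.getD_eq_getElem?_getD, List.extract_eq_drop_take]
        rw [List.getElem?_take_of_lt (by omega), List.getElem?_drop, Nat.add_zero]
      -- the three emitted words
      have L : (s.extract lo hi ++ tail).length = (hi' - lo) + 5 := by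
        rw [hcur, List.length_append, hAlen, htlen]
      have w1 : (s.extract lo hi ++ tail).getD ((s.extract lo hi ++ tail).length - 5) "" = t.getD 0 "" := by
        rw [hcur] at *
        rw [L, show hi' - lo + 5 - 5 = hi' - lo by omega]
        simp [List.getD_eq_getElem?_getD, List.getElem?_append_right, hAlen]
      have w2 : (s.extract lo hi ++ tail).getD 0 "" = s.getD lo "" := by
        rw [hcur, ← hA0]
        have : 0 < (s.extract lo hi').length := by omega
        simp [List.getD_eq_getElem?_getD, List.getElem?_append_left this]
      have w3 : (s.extract lo hi ++ tail).getD ((s.extract lo hi ++ tail).length - 1) "" = t.getD 4 "" := by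
        rw [hcur] at *
        rw [L, show hi' - lo + 5 - 1 = (hi' - lo) + 4 by omega]
        simp [List.getD_eq_getElem?_getD, List.getElem?_append_right, hAlen]
      -- the list after one round
      have hnext : wmNext (s.extract lo hi ++ tail) = s.extract (lo + 1) hi' ++ (t.drop 1).dropLast := by
        rw [hcur]
        unfold wmNext
        rw [List.length_append, hAlen, htlen, show hi' - lo + 5 - 5 = hi' - lo by omega,
          ← hAlen, List.eraseIdx_append_of_length_le (le_refl _), Nat.sub_self]
        have hAne : s.extract lo hi' ≠ [] := by
          intro hn; rw [hn] at hAlen; simp at hAlen; omega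
        have htne : t.eraseIdx 0 ≠ [] := by
          have : (t.eraseIdx 0).length = 4 := by rw [List.length_eraseIdx, if_pos (by omega)]; omega
          intro hn; rw [hn] at this; simp at this
        rw [List.tail_append_of_ne_nil hAne, List.dropLast_append_of_ne_nil htne]
        congr 1
        · -- (s.extract lo hi').tail = s.extract (lo+1) hi'
          simp only [List.extract_eq_drop_take]
          rw [← List.drop_one, List.drop_take, List.drop_drop,
            show hi' - lo - 1 = hi' - (lo + 1) by omega]
        · rw [List.eraseIdx_zero, List.drop_one]
      -- assemble
      rw [hrf]
      have hnt : ((s.extract hi' hi ++ tail).drop 1).dropLast.length = 3 := by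
        rw [List.length_dropLast, List.length_drop, ← ht, htlen]
      rw [ih (lo + 1) hi' (((s.extract hi' hi ++ tail).drop 1).dropLast) _
        (by omega) hlo' (by rw [hnt]; omega) (by omega)]
      conv_rhs => rw [wmRounds, dif_pos (by omega)]
      rw [w1, w2, w3, hnext]
      have hlo_cast : PySem.List.pyGetD s ((lo : Nat) : Int) "" = s.getD lo "" :=
        PySem.List.pyGetD_natCast s lo ""
      rw [hlo_cast, ← ht, htlen]
      simp [List.append_assoc]
    · rw [wmLoopB, if_neg hg, wmRounds, dif_neg (by omega)]
      simp

-- ===== VERDICT (by name: the statement is the Claim_ definition above) =====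
theorem word_mixer_spec : Claim_equal_word_mixer := by
  intro word_list _
  unfold Spec_word_mixer word_mixer word_mixer_alt
  set s := PySem.List.sorted word_list (fun x => x) false with hs
  by_cases h : 5 < s.length
  · rw [if_pos h, if_neg (by omega)]
    rw [loopA_eq s.length s [] le_rfl, List.nil_append,
      loopB_eq s s.length 0 s.length [] [] le_rfl (by omega) (by simp) (by omega)]
    simp [List.extract_eq_drop_take]
  · rw [if_neg h, if_pos (by omega)]
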